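-- pv_equiv track=rewrite | github.com/jooseop/coding-test | prg_입실 퇴실.py | solution
-- ===== SOURCE A (Python) =====
-- from collections import deque
--
-- def solution(enter, leave):
--     answer = [0] * len(enter)
--     leave = deque(leave)
--     l = leave.popleft()
--     room = []
--
--     for e in enter:
--         room.append(e)
--
--         if len(room) >= 2:
--             for r in room[:-1]:
--                 answer[r - 1] += 1
--             answer[room[-1] - 1] += len(room) - 1
--
--         while l in room:
--             room.remove(l)
--             if leave:
--                 l = leave.popleft()
--
--     return answer
-- ===== SOURCE B (Python) =====
-- from collections import deque
--
-- def solution(enter, leave):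
--     n = len(enter)
--     answer = [0] * n
--     occupants = {}   # id -> number of that id in the room now
--     stays = {}       # id -> its open stays, oldest first: (entries so far, room size) at entry
--     size = 0         # current room size
--     entries = 0      # entries so far
--     it = iter(leave)
--     l = next(it)     # the id currently called to leave
--     for e in enter:
--         stays.setdefault(e, deque()).append((entries, size))
--         occupants[e] = occupants.get(e, 0) + 1
--         entries += 1
--         size += 1
--         while occupants.get(l, 0) > 0:
--             g0, s0 = stays[l].popleft()
--             answer[l - 1] += s0 + (entries - g0 - 1)   # met at entry + entered while inside
--             occupants[l] -= 1
--             size -= 1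
--             l = next(it, l)   # once the list is exhausted, the current call stays in force
--     for x, q in stays.items():           # whoever never leaves: count what they saw so far
--         for g0, s0 in q:
--             answer[x - 1] += s0 + (entries - g0 - 1)
--     return answer
-- ===== Notes on version B (the rewrite author's own statement) =====
-- stated objective: faster
-- what changed: A re-scans the whole occupant list on every entry (one increment per occupant) and removes leavers by scanning a list; B keeps per-id occupant counters and per-stay records (entry counter, room size at entry), crediting each stay once at entry and once when it ends, which is O(n) dictionary work. Pre_ excludes empty leave (A raises IndexError popping it) and ids outside Python's index range for answer, where A raises IndexError whenever such an id shares the room with another and only returns the untouched zero list in the degenerate single-occupant case, on which B's per-person write raises.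
-- outside the precondition, e.g. on solution([5], [5]): A returns [0], B raises IndexError; on solution([3], [1]): A returns [0], B raises IndexError
import Mathlib
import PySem

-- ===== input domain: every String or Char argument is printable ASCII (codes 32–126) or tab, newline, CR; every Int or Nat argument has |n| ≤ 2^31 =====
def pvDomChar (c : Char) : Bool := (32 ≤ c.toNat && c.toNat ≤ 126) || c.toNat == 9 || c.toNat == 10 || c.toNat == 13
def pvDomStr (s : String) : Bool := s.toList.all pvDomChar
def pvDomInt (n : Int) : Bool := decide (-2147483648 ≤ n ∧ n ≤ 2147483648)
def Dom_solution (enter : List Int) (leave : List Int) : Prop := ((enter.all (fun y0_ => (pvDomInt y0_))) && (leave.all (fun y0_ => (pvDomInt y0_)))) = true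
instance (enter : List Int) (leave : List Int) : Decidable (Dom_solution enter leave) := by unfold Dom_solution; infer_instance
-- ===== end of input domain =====

-- B replaces A's quadratic bookkeeping (one increment per occupant at every entry, plus list
-- scans for membership and removal) by per-id occupant counters and stay records: each stay is
-- credited once at entry (room size then) and once at its end (entries made meanwhile) —
-- O(n) dictionary work where A does O(n^2) list scans (objective: faster).

-- ===== PORT A =====
-- answer[i] += v  (pySetD/pyGetD are Python-exact including the negative-index wrap;
-- where Python raises IndexError — outside Pre_ — pySetD leaves the list unchanged)
def aIncr (ans : List Int) (i : Int) (v : Int) : List Int :=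
  PySem.List.pySetD ans i (PySem.List.pyGetD ans i 0 + v)

-- "if len(room) >= 2: for r in room[:-1]: answer[r-1] += 1; answer[room[-1]-1] += len(room)-1"
def aEnter (ans room : List Int) : List Int :=
  if 2 ≤ room.length then
    let a1 := (PySem.List.slice room none (some (-1))).foldl (fun a r => aIncr a (r - 1) 1) ans
    aIncr a1 (PySem.List.pyGetD room (-1) 0 - 1) (PySem.List.len room - 1)
  else ans

-- "while l in room: room.remove(l); if leave: l = leave.popleft()"
def aWhile (room : List Int) (l : Int) (lv : List Int) : List Int × Int × List Int :=
  if h : l ∈ room then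
    let room' := room.erase l   -- room.remove(l): first occurrence (PySem.List.remove?_eq_some_erase)
    match lv with
    | [] => aWhile room' l []
    | x :: rest => aWhile room' x rest
  else (room, l, lv)
termination_by room.length
decreasing_by all_goals simpa [List.length_erase, h] using Nat.sub_lt (List.length_pos_of_mem h) one_pos

-- the body of "for e in enter:" with state (answer, room, l, leave-deque)
def stepA (st : List Int × List Int × Int × List Int) (e : Int) : List Int × List Int × Int × List Int :=
  let room := st.2.1 ++ [e]
  let ans := aEnter st.1 room
  let w := aWhile room st.2.2.1 st.2.2.2
  (ans, w.1, w.2.1, w.2.2)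

def solution (enter : List Int) (leave : List Int) : List Int :=
  let answer := List.replicate enter.length (0:Int)
  match leave with
  | [] => answer   -- Python raises IndexError here (popleft on an empty deque); outside Pre_
  | l0 :: lv0 => (enter.foldl stepA (answer, [], l0, lv0)).1

-- ===== PORT B =====
-- "while occupants.get(l, 0) > 0: g0, s0 = stays[l].popleft(); answer[l-1] += s0+(entries-g0-1);
--  occupants[l] -= 1; size -= 1; l = next(it, l)"
-- The iterator cursor is the pair (l, lv); fuel is a totality guard only — every iteration
-- removes one occupant, and the caller passes the room size.
def bWhile (fuel : Nat) (ans : List Int) (occ : PySem.Dict Int Int)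
    (stays : PySem.Dict Int (List (Int × Int))) (size g l : Int) (lv : List Int) :
    List Int × PySem.Dict Int Int × PySem.Dict Int (List (Int × Int)) × Int × Int × List Int :=
  match fuel with
  | 0 => (ans, occ, stays, size, l, lv)
  | fuel + 1 =>
    if 0 < occ.getD l 0 then
      let q := stays.getD l []
      let r := q.headD (0, 0)       -- stays[l].popleft(); q is nonempty whenever occupants[l] > 0
      let ans := PySem.List.pySetD ans (l - 1)
        (PySem.List.pyGetD ans (l - 1) 0 + (r.2 + (g - r.1 - 1)))
      let occ := occ.insert l (occ.getD l 0 - 1)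
      let stays := stays.insert l q.tail
      match lv with
      | [] => bWhile fuel ans occ stays (size - 1) g l []
      | x :: rest => bWhile fuel ans occ stays (size - 1) g x rest
    else (ans, occ, stays, size, l, lv)

-- the body of "for e in enter:" with state (answer, occupants, stays, size, entries, l, lv)
def stepB (st : List Int × PySem.Dict Int Int × PySem.Dict Int (List (Int × Int)) × Int × Int × Int × List Int)
    (e : Int) :
    List Int × PySem.Dict Int Int × PySem.Dict Int (List (Int × Int)) × Int × Int × Int × List Int :=
  match st with
  | (ans, occ, stays, size, g, l, lv) =>
    let stays := stays.insert e (stays.getD e [] ++ [(g, size)])  -- stays.setdefault(e, deque()).append((entries, size))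
    let occ := occ.insert e (occ.getD e 0 + 1)                    -- occupants[e] = occupants.get(e, 0) + 1
    let g := g + 1
    let size := size + 1
    let w := bWhile size.toNat ans occ stays size g l lv
    (w.1, w.2.1, w.2.2.1, w.2.2.2.1, g, w.2.2.2.2.1, w.2.2.2.2.2)

-- "for x, q in stays.items(): for g0, s0 in q: answer[x-1] += s0 + (entries - g0 - 1)"
def bFlushQ (g : Int) (x : Int) (ans : List Int) (q : List (Int × Int)) : List Int :=
  q.foldl (fun a r => PySem.List.pySetD a (x - 1)
    (PySem.List.pyGetD a (x - 1) 0 + (r.2 + (g - r.1 - 1)))) ans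

def solution_alt (enter : List Int) (leave : List Int) : List Int :=
  match leave with
  | [] => List.replicate enter.length (0:Int)   -- Python raises StopIteration here; outside Pre_
  | l0 :: lv0 =>
    match enter.foldl stepB
      (List.replicate enter.length (0:Int), PySem.Dict.empty, PySem.Dict.empty, 0, 0, l0, lv0) with
    | (ans, _, stays, _, g, _, _) =>
      stays.items.foldl (fun a pq => bFlushQ g pq.1 a pq.2) ans

-- ===== PRECONDITION & SPEC =====
-- Pre_ is where the Python A returns normally: leave nonempty (A pops it unconditionally and
-- raises IndexError otherwise) and every entering id inside Python's index range [1-n, n] for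
-- answer (outside it A raises IndexError whenever such an id shares the room with another;
-- in the degenerate case where the room never reaches size 2, A happens to return the untouched
-- zero list while B's per-person write raises, so those inputs are excluded too).
def Pre_solution (enter : List Int) (leave : List Int) : Prop :=
  leave ≠ [] ∧ ∀ x ∈ enter, 1 - (enter.length : Int) ≤ x ∧ x ≤ (enter.length : Int)
instance (enter : List Int) (leave : List Int) : Decidable (Pre_solution enter leave) := by
  unfold Pre_solution; infer_instance

def pvWitness_solution : List Int × List Int := ([2, 1, 3], [1, 3, 2])

def Spec_solution (enter : List Int) (leave : List Int) (out : List Int) : Prop := out = solution_alt enter leave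
instance (enter : List Int) (leave : List Int) (out : List Int) : Decidable (Spec_solution enter leave out) := by unfold Spec_solution; infer_instance

-- ===== CLAIM (what is proved, stated in full; the proofs are below) =====
def Claim_equal_solution : Prop := ∀ (enter : List Int) (leave : List Int), Dom_solution enter leave → Pre_solution enter leave → Spec_solution enter leave (solution enter leave)

-- ===== LEMMAS AND PROOFS =====

-- the still-missing leave credit of one stay record (g0, s0) after g entries
def credit (g : Int) (r : Int × Int) : Int := r.2 + (g - r.1 - 1)

-- the leave credit still owed to answer cell i by the open stays of id x
def pendQ (n : Nat) (g : Int) (i : Nat) (x : Int) (q : List (Int × Int)) : Int :=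
  if PySem.List.pyIdx? n (x - 1) = some i then (q.map (credit g)).sum else 0

-- …and by all open stays
def pend (n : Nat) (g : Int) (i : Nat) (items : List (Int × List (Int × Int))) : Int :=
  (items.map (fun pq => pendQ n g i pq.1 pq.2)).sum

-- The simulation invariant tying A's state (answer, room, l, lv) to B's
-- (answer, occupants, stays, size, entries, l, lv): same cursor, occupants/stays record the
-- multiset of people in A's room, and A's answer is ahead of B's by exactly the pending
-- leave credits.
def SimInv (n : Nat) (ansA room : List Int) (lA : Int) (lvA : List Int)
    (ansB : List Int) (occ : PySem.Dict Int Int) (stays : PySem.Dict Int (List (Int × Int)))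
    (size g : Int) (lB : Int) (lvB : List Int) : Prop :=
  lB = lA ∧ lvB = lvA ∧
  (∀ x : Int, occ.getD x 0 = (room.count x : Int)) ∧
  (∀ x : Int, ((stays.getD x []).length : Int) = (room.count x : Int)) ∧
  size = (room.length : Int) ∧
  stays.keys.Nodup ∧
  (∀ r ∈ room, r ∈ stays.keys) ∧
  ansA.length = n ∧ ansB.length = n ∧
  (∀ i : Nat, i < n → ansA.getD i 0 = ansB.getD i 0 + pend n g i stays.items)

lemma pyIdx?_lt (n : Nat) (t : Int) (k : Nat) (h : PySem.List.pyIdx? n t = some k) : k < n := by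
  unfold PySem.List.pyIdx? at h
  split_ifs at h <;> simp_all <;> omega

-- effect of "answer[t] += v" on cell i, for every Int index t (IndexError = no-op in the port)
lemma getD_setadd (a : List Int) (t v : Int) (i : Nat) :
    (PySem.List.pySetD a t (PySem.List.pyGetD a t 0 + v)).getD i 0
      = a.getD i 0 + (if PySem.List.pyIdx? a.length t = some i then v else 0) := by
  rcases h : PySem.List.pyIdx? a.length t with _ | k
  · simp [PySem.List.pySetD, PySem.List.pySet?, h]
  · have hk : k < a.length := pyIdx?_lt _ _ _ h
    simp only [PySem.List.pySetD, PySem.List.pySet?, PySem.List.pyGetD, PySem.List.pyGet?, h,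
      Option.map_some, Option.getD_some]
    rw [List.getD_eq_getElem?_getD, List.getElem?_set]
    by_cases hik : k = i
    · subst hik
      simp [hk, List.getD_eq_getElem?_getD, List.getElem?_eq_getElem hk]
    · simp [hik, List.getD_eq_getElem?_getD]

lemma foldl_incr_length (room : List Int) (a : List Int) :
    (room.foldl (fun acc r => aIncr acc (r - 1) 1) a).length = a.length := by
  induction room generalizing a with
  | nil => rfl
  | cons r rs ih =>
    rw [List.foldl_cons, ih]
    exact PySem.List.length_pySetD a (r-1) _

-- effect of "for r in room: answer[r-1] += 1" on cell i
lemma foldl_incr_getD (room : List Int) (a : List Int) (i : Nat) :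
    (room.foldl (fun acc r => aIncr acc (r - 1) 1) a).getD i 0
      = a.getD i 0 + (room.countP (fun r => PySem.List.pyIdx? a.length (r - 1) == some i) : Int) := by
  induction room generalizing a with
  | nil => simp
  | cons r rs ih =>
    have hlen : (aIncr a (r-1) 1).length = a.length := PySem.List.length_pySetD a (r-1) _
    rw [List.foldl_cons, ih (aIncr a (r-1) 1), hlen,
        show aIncr a (r-1) 1 = PySem.List.pySetD a (r - 1) (PySem.List.pyGetD a (r - 1) 0 + 1) from rfl,
        getD_setadd a (r-1) 1 i, List.countP_cons]
    by_cases hir : PySem.List.pyIdx? a.length (r - 1) = some i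
    · simp [hir]; ring
    · simp [hir]

-- effect of one entry e on answer cell i: +1 per occupant, +occupancy for e itself
lemma aEnter_getD (ans room : List Int) (e : Int) (i : Nat) :
    (aEnter ans (room ++ [e])).getD i 0
      = ans.getD i 0 + (room.countP (fun r => PySem.List.pyIdx? ans.length (r - 1) == some i) : Int)
        + (if PySem.List.pyIdx? ans.length (e - 1) = some i then (room.length : Int) else 0) := by
  unfold aEnter
  rcases List.eq_nil_or_concat' room with rfl | ⟨r0, rs, rfl⟩
  · simp
  · have h2 : 2 ≤ ((r0 ++ [rs]) ++ [e]).length := by simp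
    rw [if_pos h2, PySem.List.slice_to_neg_one, List.dropLast_concat,
        PySem.List.pyGetD_neg_one_append_singleton]
    have hl1 : ((r0 ++ [rs]).foldl (fun a r => aIncr a (r - 1) 1) ans).length = ans.length :=
      foldl_incr_length _ ans
    have hlen : PySem.List.len ((r0 ++ [rs]) ++ [e]) - 1 = ((r0 ++ [rs]).length : Int) := by
      simp [PySem.List.len]; omega
    rw [hlen,
        show aIncr ((r0 ++ [rs]).foldl (fun a r => aIncr a (r - 1) 1) ans) (e - 1) ((r0 ++ [rs]).length : Int)
          = PySem.List.pySetD _ (e-1) (PySem.List.pyGetD _ (e-1) 0 + _) from rfl,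
        getD_setadd _ (e-1) _ i, hl1, foldl_incr_getD _ ans i]

lemma aEnter_length (ans room : List Int) : (aEnter ans room).length = ans.length := by
  unfold aEnter
  split
  · rw [show aIncr _ _ _ = PySem.List.pySetD _ _ _ from rfl, PySem.List.length_pySetD,
        foldl_incr_length]
  · rfl

-- one more entry makes every open stay worth one more meeting
lemma sum_credit_succ (g : Int) (q : List (Int × Int)) :
    (q.map (credit (g + 1))).sum = (q.map (credit g)).sum + (q.length : Int) := by
  induction q with
  | nil => simp
  | cons r rs ih => simp [credit, ih] at *; ring

lemma pend_succ (n : Nat) (g : Int) (i : Nat) (items : List (Int × List (Int × Int))) :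
    pend n (g + 1) i items
      = pend n g i items
        + (items.map (fun pq =>
            if PySem.List.pyIdx? n (pq.1 - 1) = some i then (pq.2.length : Int) else 0)).sum := by
  induction items with
  | nil => simp [pend]
  | cons pq rest ih =>
    simp only [pend, List.map_cons, List.sum_cons] at *
    rw [ih]
    unfold pendQ
    by_cases h : PySem.List.pyIdx? n (pq.1 - 1) = some i
    · simp [h, sum_credit_succ]; ring
    · simp [h]

-- replacing the (unique) entry of key x in an association list shifts a sum by the delta at x
lemma sum_map_replace (items : List (Int × List (Int × Int))) (x : Int)
    (q' : List (Int × Int)) (f : Int × List (Int × Int) → Int)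
    (hnd : (items.map (·.1)).Nodup) (q : List (Int × Int)) (hmem : (x, q) ∈ items) :
    ((items.map (fun p => if p.1 == x then (x, q') else p)).map f).sum
      = (items.map f).sum - f (x, q) + f (x, q') := by
  induction items with
  | nil => simp at hmem
  | cons pq rest ih =>
    rcases List.mem_cons.mp hmem with h | h
    · subst h
      have hnd' : ((x, q).1 :: rest.map (·.1)).Nodup := by simpa using hnd
      have hxx : x ∉ rest.map (·.1) := by simpa using (List.nodup_cons.mp hnd').1
      have hx : ∀ p ∈ rest, ¬ (p.1 == x) := fun p hp hbeq =>
        hxx (List.mem_map.mpr ⟨p, hp, by simpa using hbeq⟩)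
      simp only [List.map_cons, List.sum_cons]
      rw [List.map_congr_left (fun p hp => if_neg (hx p hp))]
      simp
      ring
    · have hfst : pq.1 ∉ rest.map (·.1) ∧ (rest.map (·.1)).Nodup := by
        have := List.nodup_cons.mp (by simpa using hnd : (pq.1 :: rest.map (·.1)).Nodup)
        exact this
      have hne : ¬ (pq.1 == x) := by
        intro hbeq
        have h1 : pq.1 = x := by simpa using hbeq
        exact hfst.1 (List.mem_map.mpr ⟨(x, q), h, by simp [h1]⟩)
      simp only [List.map_cons, List.sum_cons, if_neg hne]
      rw [ih hfst.2 h]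
      ring

-- the number of occupants a fresh entry meets, per answer cell, read off the stays table
lemma sum_ite_single (keys : List Int) (hnd : keys.Nodup) (r : Int) (hr : r ∈ keys)
    (c : Int → Int) :
    (keys.map (fun x => if x = r then c x else 0)).sum = c r := by
  induction keys with
  | nil => simp at hr
  | cons k ks ih =>
    rcases List.mem_cons.mp hr with h | h
    · have hk : r ∉ ks := h ▸ (List.nodup_cons.mp hnd).1
      have hz : ∀ x ∈ ks, (if x = r then c x else 0) = 0 := by
        intro x hx
        have : ¬ (x = r) := fun hxr => hk (hxr ▸ hx)
        rw [if_neg this]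
      simp only [List.map_cons, List.sum_cons, if_pos h]
      rw [List.map_congr_left hz]
      simp [h]
    · have hkr : ¬ (k = r) := fun he => (List.nodup_cons.mp hnd).1 (he ▸ h)
      simp only [List.map_cons, List.sum_cons, if_neg hkr]
      rw [ih (List.nodup_cons.mp hnd).2 h]
      simp

lemma sum_ite_count (keys : List Int) (room : List Int) (p : Int → Bool)
    (cnt : Int → Int) (hcnt : ∀ x, cnt x = (room.count x : Int))
    (hnd : keys.Nodup) (hsub : ∀ r ∈ room, r ∈ keys) :
    (keys.map (fun x => if p x then cnt x else 0)).sum = (room.countP p : Int) := by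
  rw [List.map_congr_left (fun x _ => by rw [hcnt x] :
    ∀ x ∈ keys, (if p x then cnt x else 0) = (if p x then (room.count x : Int) else 0))]
  clear hcnt
  induction room with
  | nil => simp
  | cons r rs ih =>
    have hsub' : ∀ x ∈ rs, x ∈ keys := fun x hx => hsub x (List.mem_cons_of_mem r hx)
    have hrk : r ∈ keys := hsub r List.mem_cons_self
    have hmc : ∀ x ∈ keys, (if p x then (((r :: rs).count x : Nat) : Int) else 0)
        = (if p x then ((rs.count x : Nat) : Int) else 0)
          + (if x = r then (if p x then 1 else 0) else 0) := by
      intro x _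
      rw [List.count_cons]
      by_cases hpx : p x <;> by_cases hxr : x = r <;> split_ifs <;> simp_all
    rw [List.map_congr_left hmc, PySem.List.sum_map_add_int, ih hsub',
        sum_ite_single keys hnd r hrk _, List.countP_cons]
    by_cases hpr : p r <;> simp [hpr]


-- a contained key's current queue is an entry of items
lemma mem_items_getD (d : PySem.Dict Int (List (Int × Int))) (x : Int)
    (hc : d.contains x = true) : (x, d.getD x []) ∈ d.items := by
  have h1 := PySem.Dict.contains_eq_isSome_get? d x
  rw [hc] at h1
  rcases hq : d.get? x with _ | v
  · rw [hq] at h1; simp at h1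
  · have := PySem.Dict.mem_items_of_get?_eq_some d hq
    rwa [PySem.Dict.getD_eq_get?_getD, hq]

lemma keys_eq_map_fst (d : PySem.Dict Int (List (Int × Int))) :
    d.items.map (·.1) = d.keys := rfl

lemma pend_insert_contains (n : Nat) (g : Int) (i : Nat)
    (stays : PySem.Dict Int (List (Int × Int))) (x : Int) (q' : List (Int × Int))
    (hnd : stays.keys.Nodup) (hc : stays.contains x = true) :
    pend n g i (stays.insert x q').items
      = pend n g i stays.items - pendQ n g i x (stays.getD x []) + pendQ n g i x q' := by
  rw [PySem.Dict.items_insert_of_contains stays q' hc]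
  unfold pend
  have := sum_map_replace stays.items x q' (fun pq => pendQ n g i pq.1 pq.2)
    (by rw [keys_eq_map_fst]; exact hnd) (stays.getD x []) (mem_items_getD stays x hc)
  simpa using this

lemma pend_insert_not_contains (n : Nat) (g : Int) (i : Nat)
    (stays : PySem.Dict Int (List (Int × Int))) (x : Int) (q' : List (Int × Int))
    (hc : stays.contains x = false) :
    pend n g i (stays.insert x q').items = pend n g i stays.items + pendQ n g i x q' := by
  rw [PySem.Dict.items_insert_of_not_contains stays q' hc]
  unfold pend
  simp

lemma bFlushQ_length (g x : Int) (a : List Int) (q : List (Int × Int)) :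
    (bFlushQ g x a q).length = a.length := by
  induction q generalizing a with
  | nil => rfl
  | cons r rs ih =>
    show (bFlushQ g x _ rs).length = _
    rw [ih, PySem.List.length_pySetD]

-- flushing one id's open stays adds exactly their pending credit to each cell
lemma bFlushQ_getD (g x : Int) (a : List Int) (q : List (Int × Int)) (i : Nat) :
    (bFlushQ g x a q).getD i 0 = a.getD i 0 + pendQ a.length g i x q := by
  induction q generalizing a with
  | nil => simp [bFlushQ, pendQ]
  | cons r rs ih =>
    show (bFlushQ g x (PySem.List.pySetD a (x-1) (PySem.List.pyGetD a (x-1) 0 + (r.2 + (g - r.1 - 1)))) rs).getD i 0 = _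
    rw [ih, getD_setadd, PySem.List.length_pySetD]
    unfold pendQ
    by_cases h : PySem.List.pyIdx? a.length (x - 1) = some i
    · simp [h, credit]; ring
    · simp [h]

lemma flush_length (g : Int) (items : List (Int × List (Int × Int))) (a : List Int) :
    (items.foldl (fun a pq => bFlushQ g pq.1 a pq.2) a).length = a.length := by
  induction items generalizing a with
  | nil => rfl
  | cons pq rest ih => rw [List.foldl_cons, ih, bFlushQ_length]

-- the final loop pays out all pending credit
lemma flush_getD (g : Int) (items : List (Int × List (Int × Int))) (a : List Int) (i : Nat) :
    (items.foldl (fun a pq => bFlushQ g pq.1 a pq.2) a).getD i 0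
      = a.getD i 0 + pend a.length g i items := by
  induction items generalizing a with
  | nil => simp [pend]
  | cons pq rest ih =>
    rw [List.foldl_cons, ih, bFlushQ_getD, bFlushQ_length]
    unfold pend
    simp [add_assoc]

-- the two while loops run in lockstep and preserve the invariant
lemma while_lockstep (n : Nat) :
    ∀ (fuel : Nat) (ansA room : List Int) (l : Int) (lv ansB : List Int)
      (occ : PySem.Dict Int Int) (stays : PySem.Dict Int (List (Int × Int))) (size g : Int),
      room.length ≤ fuel →
      SimInv n ansA room l lv ansB occ stays size g l lv →
      SimInv n ansA (aWhile room l lv).1 (aWhile room l lv).2.1 (aWhile room l lv).2.2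
        (bWhile fuel ansB occ stays size g l lv).1
        (bWhile fuel ansB occ stays size g l lv).2.1
        (bWhile fuel ansB occ stays size g l lv).2.2.1
        (bWhile fuel ansB occ stays size g l lv).2.2.2.1 g
        (bWhile fuel ansB occ stays size g l lv).2.2.2.2.1
        (bWhile fuel ansB occ stays size g l lv).2.2.2.2.2 := by
  intro fuel
  induction fuel with
  | zero =>
    intro ansA room l lv ansB occ stays size g hf hInv
    have hroom : room = [] := List.length_eq_zero_iff.mp (by omega)
    subst hroom
    rw [aWhile, dif_neg (by simp)]
    exact hInv
  | succ fuel ih =>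
    intro ansA room l lv ansB occ stays size g hf hInv
    obtain ⟨-, -, hocc, hstay, hsize, hknd, hcov, hlenA, hlenB, hrel⟩ := hInv
    by_cases hg : 0 < occ.getD l 0
    · have hcnt : 0 < room.count l := by
        have := hocc l; omega
      have hmem : l ∈ room := List.count_pos_iff.mp hcnt
      have hqlen : ((stays.getD l []).length : Int) = (room.count l : Int) := hstay l
      have hqne : stays.getD l [] ≠ [] := by
        intro h0; rw [h0] at hqlen; simp at hqlen; omega
      have hcont : stays.contains l = true := by
        by_contra hcf
        exact hqne (PySem.Dict.getD_of_not_contains stays []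
          (Bool.not_eq_true _ ▸ (by simpa using hcf)))
      obtain ⟨r0, qt, hqeq⟩ : ∃ r0 qt, stays.getD l [] = r0 :: qt := by
        rcases hq : stays.getD l [] with _ | ⟨r0, qt⟩
        · exact absurd hq hqne
        · exact ⟨r0, qt, rfl⟩
      -- the invariant after one joint iteration (for whatever the new cursor is)
      have hmid : ∀ (l' : Int) (lv' : List Int), SimInv n ansA (room.erase l) l' lv'
          (PySem.List.pySetD ansB (l - 1)
            (PySem.List.pyGetD ansB (l - 1) 0 + (((stays.getD l []).headD (0,0)).2
              + (g - ((stays.getD l []).headD (0,0)).1 - 1))))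
          (occ.insert l (occ.getD l 0 - 1)) (stays.insert l (stays.getD l []).tail)
          (size - 1) g l' lv' := by
        intro l' lv'
        refine ⟨rfl, rfl, ?_, ?_, ?_, PySem.Dict.nodup_keys_insert _ _ _ hknd, ?_, hlenA, ?_, ?_⟩
        · intro x
          rw [PySem.Dict.getD_insert]
          by_cases hxl : x = l
          · subst hxl
            rw [if_pos rfl, hocc x, List.count_erase_self]
            omega
          · rw [if_neg hxl, hocc x, List.count_erase_of_ne hxl]
        · intro x
          rw [PySem.Dict.getD_insert]
          by_cases hxl : x = l
          · subst hxl
            rw [if_pos rfl, List.count_erase_self, hqeq]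
            have := hqlen
            rw [hqeq] at this
            simp at this ⊢
            omega
          · rw [if_neg hxl, hstay x, List.count_erase_of_ne hxl]
        · rw [hsize, List.length_erase, if_pos hmem]
          have : 0 < room.length := List.length_pos_of_mem hmem
          omega
        · intro r hr
          have : r ∈ room := List.erase_subset hr
          rcases (PySem.Dict.mem_keys_insert stays l r _).mpr (Or.inr (hcov r this)) with h
          exact h
        · rw [PySem.List.length_pySetD]; exact hlenB
        · intro i hi
          rw [getD_setadd ansB (l - 1)
              (((stays.getD l []).headD (0,0)).2 + (g - ((stays.getD l []).headD (0,0)).1 - 1)) i,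
            hlenB, pend_insert_contains n g i stays l _ hknd hcont, hrel i hi]
          rw [hqeq]
          unfold pendQ
          by_cases hhit : PySem.List.pyIdx? n (l - 1) = some i
          · simp [hhit, credit]; ring
          · simp [hhit]
      have hlenerase : (room.erase l).length ≤ fuel := by
        rw [List.length_erase, if_pos hmem]
        omega
      rw [aWhile, dif_pos hmem, bWhile, if_pos hg]
      cases lv with
      | nil => exact ih ansA (room.erase l) l [] _ _ _ (size - 1) g hlenerase (hmid l [])
      | cons x rest =>
        exact ih ansA (room.erase l) x rest _ _ _ (size - 1) g hlenerase (hmid x rest)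
    · have hmem : l ∉ room := by
        have := hocc l
        intro hm
        have := List.count_pos_iff.mpr hm
        omega
      rw [aWhile, dif_neg hmem, bWhile, if_neg hg]
      exact ⟨rfl, rfl, hocc, hstay, hsize, hknd, hcov, hlenA, hlenB, hrel⟩

-- one entry followed by its while loop preserves the invariant
lemma step_lockstep (n : Nat) (ansA room : List Int) (l : Int) (lv ansB : List Int)
    (occ : PySem.Dict Int Int) (stays : PySem.Dict Int (List (Int × Int))) (size g : Int)
    (e : Int) (hInv : SimInv n ansA room l lv ansB occ stays size g l lv) :
    SimInv n (stepA (ansA, room, l, lv) e).1 (stepA (ansA, room, l, lv) e).2.1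
      (stepA (ansA, room, l, lv) e).2.2.1 (stepA (ansA, room, l, lv) e).2.2.2
      (stepB (ansB, occ, stays, size, g, l, lv) e).1
      (stepB (ansB, occ, stays, size, g, l, lv) e).2.1
      (stepB (ansB, occ, stays, size, g, l, lv) e).2.2.1
      (stepB (ansB, occ, stays, size, g, l, lv) e).2.2.2.1
      (stepB (ansB, occ, stays, size, g, l, lv) e).2.2.2.2.1
      (stepB (ansB, occ, stays, size, g, l, lv) e).2.2.2.2.2.1
      (stepB (ansB, occ, stays, size, g, l, lv) e).2.2.2.2.2.2 := by
  obtain ⟨-, -, hocc, hstay, hsize, hknd, hcov, hlenA, hlenB, hrel⟩ := hInv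
  have hmid : SimInv n (aEnter ansA (room ++ [e])) (room ++ [e]) l lv ansB
      (occ.insert e (occ.getD e 0 + 1))
      (stays.insert e (stays.getD e [] ++ [(g, size)])) (size + 1) (g + 1) l lv := by
    refine ⟨rfl, rfl, ?_, ?_, ?_, PySem.Dict.nodup_keys_insert _ _ _ hknd, ?_, ?_, hlenB, ?_⟩
    · intro x
      rw [PySem.Dict.getD_insert, List.count_append]
      by_cases hxe : x = e
      · subst hxe; rw [if_pos rfl, hocc x]; simp
      · rw [if_neg hxe, hocc x]
        simp [List.count_singleton]
        omega
    · intro x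
      rw [PySem.Dict.getD_insert, List.count_append]
      by_cases hxe : x = e
      · subst hxe
        rw [if_pos rfl]
        have := hstay x
        simp at this ⊢
        omega
      · rw [if_neg hxe, hstay x]
        simp [List.count_singleton]
        omega
    · rw [hsize]; simp
    · intro r hr
      rcases List.mem_append.mp hr with h | h
      · exact (PySem.Dict.mem_keys_insert _ _ _ _).mpr (Or.inr (hcov r h))
      · simp at h
        exact (PySem.Dict.mem_keys_insert _ _ _ _).mpr (Or.inl h)
    · rw [aEnter_length]; exact hlenA
    · intro i hi
      rw [aEnter_getD ansA room e i, hlenA, hrel i hi]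
      have hsum : pend n (g + 1) i (stays.insert e (stays.getD e [] ++ [(g, size)])).items
          = pend n (g + 1) i stays.items
            + (if PySem.List.pyIdx? n (e - 1) = some i then size else 0) := by
        by_cases hc : stays.contains e = true
        · rw [pend_insert_contains n (g+1) i stays e _ hknd hc]
          unfold pendQ
          by_cases hhit : PySem.List.pyIdx? n (e - 1) = some i
          · simp [hhit, credit]; ring
          · simp [hhit]
        · have hc' : stays.contains e = false := by simpa using hc
          rw [pend_insert_not_contains n (g+1) i stays e _ hc',
              PySem.Dict.getD_of_not_contains stays [] hc']
          unfold pendQ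
          by_cases hhit : PySem.List.pyIdx? n (e - 1) = some i
          · simp [hhit, credit]
          · simp [hhit]
      rw [hsum, pend_succ]
      have hcount : (stays.items.map (fun pq =>
          if PySem.List.pyIdx? n (pq.1 - 1) = some i then ((pq.2.length : Nat) : Int) else 0)).sum
          = (room.countP (fun r => PySem.List.pyIdx? n (r - 1) == some i) : Int) := by
        rw [PySem.Dict.items_eq_map_keys stays hknd [], List.map_map]
        have : ((fun pq : Int × List (Int × Int) =>
            if PySem.List.pyIdx? n (pq.1 - 1) = some i then ((pq.2.length : Nat) : Int) else 0)
              ∘ (fun k => (k, stays.getD k [])))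
            = fun x => if (fun r => PySem.List.pyIdx? n (r - 1) == some i) x
                then ((stays.getD x []).length : Int) else 0 := by
          funext x
          simp only [Function.comp]
          by_cases hhit : PySem.List.pyIdx? n (x - 1) = some i <;> simp [hhit]
        rw [this]
        exact sum_ite_count stays.keys room _ _ (fun x => hstay x) hknd hcov
      rw [hcount]
      rw [hsize]
      ring
  have hw := while_lockstep n (size + 1).toNat (aEnter ansA (room ++ [e])) (room ++ [e]) l lv
    ansB (occ.insert e (occ.getD e 0 + 1)) (stays.insert e (stays.getD e [] ++ [(g, size)]))
    (size + 1) (g + 1) (by rw [hsize]; simp) hmid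
  exact hw

-- folding all entries preserves the invariant
lemma fold_lockstep (n : Nat) :
    ∀ (rest ansA room : List Int) (l : Int) (lv ansB : List Int)
      (occ : PySem.Dict Int Int) (stays : PySem.Dict Int (List (Int × Int))) (size g : Int),
      SimInv n ansA room l lv ansB occ stays size g l lv →
      SimInv n (rest.foldl stepA (ansA, room, l, lv)).1
        (rest.foldl stepA (ansA, room, l, lv)).2.1
        (rest.foldl stepA (ansA, room, l, lv)).2.2.1
        (rest.foldl stepA (ansA, room, l, lv)).2.2.2
        (rest.foldl stepB (ansB, occ, stays, size, g, l, lv)).1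
        (rest.foldl stepB (ansB, occ, stays, size, g, l, lv)).2.1
        (rest.foldl stepB (ansB, occ, stays, size, g, l, lv)).2.2.1
        (rest.foldl stepB (ansB, occ, stays, size, g, l, lv)).2.2.2.1
        (rest.foldl stepB (ansB, occ, stays, size, g, l, lv)).2.2.2.2.1
        (rest.foldl stepB (ansB, occ, stays, size, g, l, lv)).2.2.2.2.2.1
        (rest.foldl stepB (ansB, occ, stays, size, g, l, lv)).2.2.2.2.2.2 := by
  intro rest
  induction rest with
  | nil =>
    intro ansA room l lv ansB occ stays size g hInv
    exact hInv
  | cons e rest' ih =>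
    intro ansA room l lv ansB occ stays size g hInv
    have hstep := step_lockstep n ansA room l lv ansB occ stays size g e hInv
    rcases hA : stepA (ansA, room, l, lv) e with ⟨a1, a2, a3, a4⟩
    rcases hB : stepB (ansB, occ, stays, size, g, l, lv) e with ⟨b1, b2, b3, b4, b5, b6, b7⟩
    rw [hA, hB] at hstep
    obtain ⟨h6, h7, -⟩ := id hstep
    rw [List.foldl_cons, List.foldl_cons, hA, hB]
    subst h6
    subst h7
    exact ih a1 a2 b6 b7 b1 b2 b3 b4 b5 hstep

-- ===== VERDICT (by name: the statement is the Claim_ definition above) =====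
theorem solution_spec : Claim_equal_solution := by
  intro enter leave _hdom hpre
  unfold Spec_solution
  obtain ⟨l0, lv0, hleq⟩ : ∃ a t, leave = a :: t := by
    cases leave with
    | nil => exact absurd rfl hpre.1
    | cons a t => exact ⟨a, t, rfl⟩
  subst hleq
  have hInit : SimInv enter.length (List.replicate enter.length 0) [] l0 lv0
      (List.replicate enter.length 0) PySem.Dict.empty PySem.Dict.empty 0 0 l0 lv0 := by
    refine ⟨rfl, rfl, ?_, ?_, by simp, by simp, by simp, by simp, by simp, ?_⟩
    · intro x; simp
    · intro x; simp
    · intro i hi; simp [pend, PySem.Dict.empty]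
  have hmain := fold_lockstep enter.length enter (List.replicate enter.length 0) [] l0 lv0
    (List.replicate enter.length 0) PySem.Dict.empty PySem.Dict.empty 0 0 hInit
  obtain ⟨-, -, -, -, -, -, -, hlenA, hlenB, hrel⟩ := hmain
  show (enter.foldl stepA (List.replicate enter.length 0, [], l0, lv0)).1
    = ((enter.foldl stepB
        (List.replicate enter.length 0, PySem.Dict.empty, PySem.Dict.empty, 0, 0, l0, lv0)).2.2.1).items.foldl
          (fun a pq => bFlushQ
            ((enter.foldl stepB
              (List.replicate enter.length 0, PySem.Dict.empty, PySem.Dict.empty, 0, 0, l0, lv0)).2.2.2.2.1)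
            pq.1 a pq.2)
          ((enter.foldl stepB
            (List.replicate enter.length 0, PySem.Dict.empty, PySem.Dict.empty, 0, 0, l0, lv0)).1)
  apply List.ext_getElem
  · rw [hlenA, flush_length, hlenB]
  · intro i h1 h2
    have hthis := hrel i (by rwa [hlenA] at h1)
    have hf := flush_getD
      ((enter.foldl stepB
        (List.replicate enter.length 0, PySem.Dict.empty, PySem.Dict.empty, 0, 0, l0, lv0)).2.2.2.2.1)
      ((enter.foldl stepB
        (List.replicate enter.length 0, PySem.Dict.empty, PySem.Dict.empty, 0, 0, l0, lv0)).2.2.1).items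
      ((enter.foldl stepB
        (List.replicate enter.length 0, PySem.Dict.empty, PySem.Dict.empty, 0, 0, l0, lv0)).1) i
    rw [hlenB] at hf
    rw [← List.getD_eq_getElem _ 0 h1, ← List.getD_eq_getElem _ 0 h2, hf, hthis]
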